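-- pv_equiv track=rewrite | github.com/yiannimercer/AdventofCode | 2022/Day16_YM.py | clean_up_valves
-- ===== SOURCE A (Python) =====
-- import collections
--
-- def clean_up_valves(valves):
--     operational = [valve for valve, (rate, _) in valves.items() if rate > 0]
--     paths = {
--         node: bfs({valve: tunnels for valve, (_, tunnels) in valves.items()}, node)
--         for node in valves
--     }
--     return {
--         valve: (
--             rate,
--             {tunnel: paths[valve][tunnel] for tunnel in operational if tunnel != valve},
--         )
--         for valve, (rate, _) in valves.items()
--         if rate != 0 or valve == "AA"
--     }
--
-- def bfs(graph, start):
--     queue = collections.deque([(0, start)])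
--     paths = {}
--     while queue:
--         distance, node = queue.popleft()
--         if node in paths:
--             continue
--         paths[node] = distance
--         for neighbor in graph[node]:
--             queue.append((distance + 1, neighbor))
--     return paths
-- ===== SOURCE B (Python) =====
-- def clean_up_valves(valves):
--     graph = {valve: tunnels for valve, (_, tunnels) in valves.items()}
--     operational = [valve for valve, (rate, _) in valves.items() if rate > 0]
--     result = {}
--     for valve, (rate, _) in valves.items():
--         if rate != 0 or valve == "AA":
--             dist = relax(graph, valve)
--             result[valve] = (
--                 rate,
--                 {tunnel: dist[tunnel] for tunnel in operational if tunnel != valve},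
--             )
--     return result
--
-- def relax(graph, start):
--     # Bellman-Ford-style fixed-point iteration: each round sweeps EVERY edge of the
--     # graph, relaxing edges whose source already has a distance; stop when no edge
--     # relaxes.  No queue/frontier is maintained.
--     dist = {start: 0}
--     while True:
--         updates = {}
--         for u in graph:
--             if u in dist:
--                 for v in graph[u]:
--                     if v not in dist and v not in updates:
--                         updates[v] = dist[u] + 1
--         if not updates:
--             return dist
--         dist.update(updates)
-- ===== Notes on version B (the rewrite author's own statement) =====
-- stated objective: alternative
-- what changed: Replaces the per-node deque BFS (precomputed for every valve) by a Bellman-Ford-style fixed-point iteration that repeatedly sweeps every edge of the graph relaxing edges from already-distanced sources until no edge relaxes, run only for the kept (rate != 0 or 'AA') valves; no queue or frontier is maintained.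
import Mathlib
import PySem

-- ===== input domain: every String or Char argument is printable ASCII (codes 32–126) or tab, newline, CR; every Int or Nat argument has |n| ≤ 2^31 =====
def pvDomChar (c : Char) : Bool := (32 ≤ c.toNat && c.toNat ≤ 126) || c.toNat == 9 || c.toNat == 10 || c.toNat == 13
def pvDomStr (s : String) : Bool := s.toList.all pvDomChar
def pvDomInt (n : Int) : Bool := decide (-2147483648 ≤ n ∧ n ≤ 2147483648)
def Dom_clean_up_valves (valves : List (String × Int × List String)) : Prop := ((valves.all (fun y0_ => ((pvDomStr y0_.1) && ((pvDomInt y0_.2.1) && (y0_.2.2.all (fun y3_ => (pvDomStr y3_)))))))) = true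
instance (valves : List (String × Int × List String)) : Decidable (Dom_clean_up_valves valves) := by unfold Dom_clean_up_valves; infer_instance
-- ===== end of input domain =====

-- B replaces A's per-node deque BFS (precomputed for every valve) by a Bellman-Ford-style
-- fixed-point iteration sweeping every edge until no edge relaxes, run only for the kept
-- valves (rate ≠ 0 or "AA"); same return value (objective: alternative algorithm).

-- ===== PORT A =====
-- both Pythons build the same graph dict {valve: tunnels for valve, (_, tunnels) in valves.items()}
def pvGraph (valves : List (String × Int × List String)) : PySem.Dict String (List String) :=
  valves.foldl (fun g kv => g.insert kv.1 kv.2.2) PySem.Dict.empty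

-- measure for BFS termination: number of graph keys not yet recorded in `paths`
def pvCnt (g : PySem.Dict String (List String)) (paths : PySem.Dict String Int) : Nat :=
  (g.keys.filter (fun k => !paths.contains k)).length

theorem pvCnt_insert_lt (g : PySem.Dict String (List String)) (paths : PySem.Dict String Int)
    (node : String) (d : Int) (hmem : node ∈ g.keys) (hfresh : paths.contains node = false) :
    pvCnt g (paths.insert node d) < pvCnt g paths := by
  unfold pvCnt
  have hsub : (g.keys.filter (fun k => !(paths.insert node d).contains k)).Sublist
      (g.keys.filter (fun k => !paths.contains k)) := by
    refine List.monotone_filter_right _ ?_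
    intro k hk
    simp only [PySem.Dict.contains_insert, Bool.not_eq_true', Bool.or_eq_false_iff] at hk ⊢
    exact hk.2
  rcases Nat.lt_or_ge (g.keys.filter (fun k => !(paths.insert node d).contains k)).length
      (g.keys.filter (fun k => !paths.contains k)).length with h | h
  · exact h
  · exfalso
    have heq := hsub.eq_of_length (Nat.le_antisymm hsub.length_le h)
    have hin : node ∈ g.keys.filter (fun k => !paths.contains k) := by
      simp [List.mem_filter, hmem, hfresh]
    rw [← heq] at hin
    simp [List.mem_filter, PySem.Dict.contains_insert_self] at hin

theorem pvMem_keys_of_get?_some {g : PySem.Dict String (List String)} {node : String}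
    {neigh : List String} (hg : g.get? node = some neigh) : node ∈ g.keys := by
  refine (PySem.Dict.contains_iff_mem_keys g node).mp ?_
  rw [PySem.Dict.contains_eq_isSome_get?, hg]; rfl

-- bfs(graph, start): deque of (distance, node) pairs, skip visited, else record and enqueue neighbours
def pvBfsLoop (g : PySem.Dict String (List String)) (queue : List (Int × String))
    (paths : PySem.Dict String Int) : PySem.Dict String Int :=
  match queue with
  | [] => paths
  | (d, node) :: rest =>
    if paths.contains node then pvBfsLoop g rest paths
    else
      match hg : g.get? node with
      | some neigh => pvBfsLoop g (rest ++ neigh.map (fun n => (d + 1, n))) (paths.insert node d)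
      | none => paths.insert node d      -- Python raises KeyError here; Pre_ excludes such inputs
termination_by (pvCnt g paths, queue.length)
decreasing_by
  · exact Prod.Lex.right _ (Nat.lt_succ_self _)
  · exact Prod.Lex.left _ _ (pvCnt_insert_lt g paths node d (pvMem_keys_of_get?_some hg)
      (by simpa using ‹¬paths.contains node = true›))

def clean_up_valves (valves : List (String × Int × List String)) : List (String × Int × (List (String × Int))) :=
  let operational := (valves.filter (fun kv => 0 < kv.2.1)).map (fun kv => kv.1)
  let graph := pvGraph valves
  let paths : PySem.Dict String (PySem.Dict String Int) :=
    valves.foldl (fun d kv => d.insert kv.1 (pvBfsLoop graph [(0, kv.1)] PySem.Dict.empty)) PySem.Dict.empty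
  (valves.foldl (fun r kv =>
      if kv.2.1 ≠ 0 ∨ kv.1 = "AA" then
        let pv := (paths.get? kv.1).getD PySem.Dict.empty
        r.insert kv.1 (kv.2.1,
          (operational.foldl (fun inn t =>
              if t ≠ kv.1 then inn.insert t (pv.getD t 0) else inn)  -- pv.getD t 0: Python raises KeyError when t is absent; Pre_ excludes
            PySem.Dict.empty).items)
      else r)
    (PySem.Dict.empty : PySem.Dict String (Int × List (String × Int)))).items

-- ===== PORT B =====
-- one sweep over every edge of the graph: relax edges whose source already has a distance
def pvSweep (g : PySem.Dict String (List String)) (dist : PySem.Dict String Int) :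
    PySem.Dict String Int :=
  g.keys.foldl (fun upd u =>
    if dist.contains u then
      (g.getD u []).foldl (fun upd v =>
        if !dist.contains v && !upd.contains v then upd.insert v (dist.getD u 0 + 1) else upd) upd
    else upd) PySem.Dict.empty

-- termination universe and measure for the fixed-point loop
def pvUniv (g : PySem.Dict String (List String)) : List String := g.keys ++ g.values.flatten

def pvCntU (g : PySem.Dict String (List String)) (dist : PySem.Dict String Int) : Nat :=
  ((pvUniv g).filter (fun k => !dist.contains k)).length

theorem pvCntU_lt (g : PySem.Dict String (List String)) (d d' : PySem.Dict String Int)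
    (hmono : ∀ k, d.contains k = true → d'.contains k = true)
    (v : String) (hv : v ∈ pvUniv g) (hv' : d'.contains v = true)
    (hnd : d.contains v = false) : pvCntU g d' < pvCntU g d := by
  unfold pvCntU
  have hsub : ((pvUniv g).filter (fun k => !d'.contains k)).Sublist
      ((pvUniv g).filter (fun k => !d.contains k)) := by
    refine List.monotone_filter_right _ ?_
    intro k hk
    simp only [Bool.not_eq_true'] at hk ⊢
    cases h : d.contains k with
    | false => rfl
    | true => rw [hmono k h] at hk; exact hk
  rcases Nat.lt_or_ge ((pvUniv g).filter (fun k => !d'.contains k)).length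
      ((pvUniv g).filter (fun k => !d.contains k)).length with h | h
  · exact h
  · exfalso
    have heq := hsub.eq_of_length (Nat.le_antisymm hsub.length_le h)
    have hin : v ∈ (pvUniv g).filter (fun k => !d.contains k) := by
      simp [List.mem_filter, hv, hnd]
    rw [← heq] at hin
    simp [List.mem_filter, hv'] at hin

theorem pvContains_update_of_contains (l : List (String × Int)) :
    ∀ (d : PySem.Dict String Int) (k : String), d.contains k = true →
      (l.foldl (fun d p => d.insert p.1 p.2) d).contains k = true := by
  induction l with
  | nil => intro d k h; exact h
  | cons p l ih =>
    intro d k h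
    exact ih _ k (by rw [PySem.Dict.contains_insert, h]; simp)

theorem pvContains_update_of_mem (l : List (String × Int)) :
    ∀ (d : PySem.Dict String Int) (p : String × Int), p ∈ l →
      (l.foldl (fun d p => d.insert p.1 p.2) d).contains p.1 = true := by
  induction l with
  | nil => intro _ _ h; cases h
  | cons q l ih =>
    intro d p hp
    rcases List.mem_cons.mp hp with h | h
    · subst h
      exact pvContains_update_of_contains l _ p.1 (PySem.Dict.contains_insert_self _ _ _)
    · exact ih _ p h

theorem pvSweep_items_fresh (g : PySem.Dict String (List String)) (dist : PySem.Dict String Int) :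
    ∀ p ∈ (pvSweep g dist).items, dist.contains p.1 = false ∧ p.1 ∈ pvUniv g := by
  have inner : ∀ (l : List String), (∀ x ∈ l, x ∈ pvUniv g) →
      ∀ (u : String) (upd : PySem.Dict String Int),
      (∀ p ∈ upd.items, dist.contains p.1 = false ∧ p.1 ∈ pvUniv g) →
      ∀ p ∈ (l.foldl (fun upd v =>
          if !dist.contains v && !upd.contains v then upd.insert v (dist.getD u 0 + 1) else upd)
          upd).items, dist.contains p.1 = false ∧ p.1 ∈ pvUniv g := by
    intro l
    induction l with
    | nil => intro _ u upd h p hp; exact h p hp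
    | cons v l ih =>
      intro hl u upd h
      simp only [List.foldl_cons]
      by_cases hc : !dist.contains v && !upd.contains v
      · rw [if_pos hc]
        refine ih (fun x hx => hl x (List.mem_cons_of_mem _ hx)) u _ ?_
        intro p hp
        rcases (PySem.Dict.mem_items_insert _ _ _ _).mp hp with h1 | h1
        · subst h1
          simp only [Bool.and_eq_true, Bool.not_eq_true'] at hc
          exact ⟨hc.1, hl v (List.mem_cons_self ..)⟩
        · exact h p h1.1
      · rw [if_neg hc]
        exact ih (fun x hx => hl x (List.mem_cons_of_mem _ hx)) u upd h
  have outer : ∀ (ks : List String), (∀ x ∈ ks, x ∈ g.keys) →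
      ∀ (upd : PySem.Dict String Int),
      (∀ p ∈ upd.items, dist.contains p.1 = false ∧ p.1 ∈ pvUniv g) →
      ∀ p ∈ (ks.foldl (fun upd u =>
          if dist.contains u then
            (g.getD u []).foldl (fun upd v =>
              if !dist.contains v && !upd.contains v then upd.insert v (dist.getD u 0 + 1) else upd) upd
          else upd) upd).items, dist.contains p.1 = false ∧ p.1 ∈ pvUniv g := by
    intro ks
    induction ks with
    | nil => intro _ upd h p hp; exact h p hp
    | cons u ks ih =>
      intro hks upd h
      simp only [List.foldl_cons]
      by_cases hc : dist.contains u = true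
      · rw [if_pos hc]
        refine ih (fun x hx => hks x (List.mem_cons_of_mem _ hx)) _ (inner _ ?_ u upd h)
        intro x hx
        have hu : u ∈ g.keys := hks u (List.mem_cons_self ..)
        have hcu : g.contains u = true := (PySem.Dict.contains_iff_mem_keys g u).mpr hu
        rw [PySem.Dict.contains_eq_isSome_get?] at hcu
        rcases hg : g.get? u with _ | l
        · rw [hg] at hcu; cases hcu
        · have : g.getD u [] = l := by
            rw [PySem.Dict.getD_eq_get?_getD, hg]; rfl
          rw [this] at hx
          have : l ∈ g.values :=
            List.mem_map_of_mem (PySem.Dict.mem_items_of_get?_eq_some g hg)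
          exact List.mem_append_right _ (List.mem_flatten.mpr ⟨l, this, hx⟩)
      · rw [if_neg hc]
        exact ih (fun x hx => hks x (List.mem_cons_of_mem _ hx)) upd h
  intro p hp
  exact outer g.keys (fun x hx => hx) PySem.Dict.empty (by simp [PySem.Dict.empty]) p hp

theorem pvRelax_measure (g : PySem.Dict String (List String)) (dist : PySem.Dict String Int)
    (h : ¬ (pvSweep g dist).items = []) :
    pvCntU g (dist.update (pvSweep g dist).items) < pvCntU g dist := by
  rcases List.exists_mem_of_ne_nil _ h with ⟨p, hp⟩
  have hfresh := pvSweep_items_fresh g dist p hp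
  refine pvCntU_lt g dist _ ?_ p.1 hfresh.2 ?_ hfresh.1
  · intro k hk; exact pvContains_update_of_contains _ dist k hk
  · exact pvContains_update_of_mem _ dist p hp

-- relax(graph, start)'s loop: sweep every edge; stop when no edge relaxed, else merge and repeat
def pvRelax (g : PySem.Dict String (List String)) (dist : PySem.Dict String Int) :
    PySem.Dict String Int :=
  if h : (pvSweep g dist).items = [] then dist
  else pvRelax g (dist.update (pvSweep g dist).items)
termination_by pvCntU g dist
decreasing_by exact pvRelax_measure g dist h

def clean_up_valves_alt (valves : List (String × Int × List String)) : List (String × Int × (List (String × Int))) :=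
  let graph := pvGraph valves
  let operational := (valves.filter (fun kv => 0 < kv.2.1)).map (fun kv => kv.1)
  (valves.foldl (fun r kv =>
      if kv.2.1 ≠ 0 ∨ kv.1 = "AA" then
        let dist := pvRelax graph (PySem.Dict.empty.insert kv.1 0)
        r.insert kv.1 (kv.2.1,
          (operational.foldl (fun inn t =>
              if t ≠ kv.1 then inn.insert t (dist.getD t 0) else inn)  -- dist.getD t 0: Python raises KeyError when t is absent; Pre_ excludes
            PySem.Dict.empty).items)
      else r)
    (PySem.Dict.empty : PySem.Dict String (Int × List (String × Int)))).items

-- ===== PRECONDITION & SPEC =====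
-- one closure step of the reachable-node set (first-match lookup; keys are unique under Pre_)
def pvReachStep (valves : List (String × Int × List String)) (s : List String) : List String :=
  PySem.List.dedup (s ++ s.flatMap (fun v => ((valves.find? (fun kv => kv.1 == v)).map (fun kv => kv.2.2)).getD []))

-- Pre_ excludes exactly the inputs on which the Python A raises KeyError: a tunnel name that is
-- not a valve key, or an operational valve unreachable from a kept (rate ≠ 0 or "AA") valve;
-- duplicate keys cannot occur in a Python dict, so requiring Nodup keys excludes nothing A accepts.
def Pre_clean_up_valves (valves : List (String × Int × List String)) : Prop :=
  (valves.map (fun kv => kv.1)).Nodup ∧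
  (∀ kv ∈ valves, ∀ t ∈ kv.2.2, t ∈ valves.map (fun kv => kv.1)) ∧
  (∀ kv ∈ valves, (kv.2.1 ≠ 0 ∨ kv.1 = "AA") →
    ∀ t ∈ valves, 0 < t.2.1 → t.1 ≠ kv.1 →
      t.1 ∈ (pvReachStep valves)^[valves.length] [kv.1])
instance (valves : List (String × Int × List String)) : Decidable (Pre_clean_up_valves valves) := by
  unfold Pre_clean_up_valves; infer_instance

def pvWitness_clean_up_valves : (List (String × Int × List String)) :=
  [("AA", 0, ["BB"]), ("BB", 13, ["AA"])]

def Spec_clean_up_valves (valves : List (String × Int × List String)) (out : List (String × Int × (List (String × Int)))) : Prop := out = clean_up_valves_alt valves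
instance (valves : List (String × Int × List String)) (out : List (String × Int × (List (String × Int)))) : Decidable (Spec_clean_up_valves valves out) := by unfold Spec_clean_up_valves; infer_instance

-- ===== CLAIM (what is proved, stated in full; the proofs are below) =====
def Claim_equal_clean_up_valves : Prop := ∀ (valves : List (String × Int × List String)), Dom_clean_up_valves valves → Pre_clean_up_valves valves → Spec_clean_up_valves valves (clean_up_valves valves)

-- ===== LEMMAS AND PROOFS =====

theorem pvCnt_insert_le (g : PySem.Dict String (List String)) (paths : PySem.Dict String Int)
    (node : String) (d : Int) : pvCnt g (paths.insert node d) ≤ pvCnt g paths := by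
  unfold pvCnt
  refine List.Sublist.length_le (List.monotone_filter_right _ ?_)
  intro k hk
  simp only [PySem.Dict.contains_insert, Bool.not_eq_true', Bool.or_eq_false_iff] at hk ⊢
  exact hk.2


-- reference distance function: refD g s k v = the BFS distance of v from s, if at most k
def pvHasPred (g : PySem.Dict String (List String)) (S : String → Option Nat)
    (ks : List String) (v : String) : Bool :=
  ks.any (fun u => (S u).isSome && decide (v ∈ g.getD u []))

def refD (g : PySem.Dict String (List String)) (s : String) : Nat → String → Option Nat
  | 0, v => if v = s then some 0 else none
  | (k+1), v =>
    match refD g s k v with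
    | some j => some j
    | none => if pvHasPred g (refD g s k) g.keys v then some (k + 1) else none

theorem refD_zero (g : PySem.Dict String (List String)) (s v : String) :
    refD g s 0 v = if v = s then some 0 else none := rfl

theorem refD_succ (g : PySem.Dict String (List String)) (s : String) (k : Nat) (v : String) :
    refD g s (k + 1) v = match refD g s k v with
      | some j => some j
      | none => if pvHasPred g (refD g s k) g.keys v then some (k + 1) else none := rfl

theorem refD_succ_of_some {g : PySem.Dict String (List String)} {s : String} {k : Nat}
    {v : String} {j : Nat} (h : refD g s k v = some j) : refD g s (k + 1) v = some j := by
  rw [refD_succ, h]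

theorem refD_succ_of_none {g : PySem.Dict String (List String)} {s : String} {k : Nat}
    {v : String} (h : refD g s k v = none) :
    refD g s (k + 1) v = if pvHasPred g (refD g s k) g.keys v then some (k + 1) else none := by
  rw [refD_succ, h]

theorem refD_mono {g : PySem.Dict String (List String)} {s : String} {k : Nat} {v : String}
    {j : Nat} (h : refD g s k v = some j) : refD g s (k + 1) v = some j :=
  refD_succ_of_some h

theorem refD_mono_le {g : PySem.Dict String (List String)} {s : String} {k m : Nat} {v : String}
    {j : Nat} (hkm : k ≤ m) (h : refD g s k v = some j) : refD g s m v = some j := by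
  induction m, hkm using Nat.le_induction with
  | base => exact h
  | succ m _ ih => exact refD_mono ih

theorem refD_none_anti {g : PySem.Dict String (List String)} {s : String} {k m : Nat} {v : String}
    (hkm : k ≤ m) (h : refD g s m v = none) : refD g s k v = none := by
  rcases hj : refD g s k v with _ | j
  · rfl
  · rw [refD_mono_le hkm hj] at h; cases h

theorem refD_some {g : PySem.Dict String (List String)} {s : String} :
    ∀ {k : Nat} {v : String} {j : Nat}, refD g s k v = some j → j ≤ k ∧ refD g s j v = some j := by
  intro k
  induction k with
  | zero =>
    intro v j h
    rw [refD_zero] at h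
    split at h
    · injection h with h'; subst h'
      exact ⟨Nat.le_refl _, by rw [refD_zero, if_pos ‹v = s›]⟩
    · cases h
  | succ k ih =>
    intro v j h
    rcases hk : refD g s k v with _ | j'
    · rw [refD_succ_of_none hk] at h
      split at h
      · injection h with h'; subst h'
        exact ⟨Nat.le_refl _, by rw [refD_succ_of_none hk, if_pos ‹_›]⟩
      · cases h
    · rw [refD_succ_of_some hk] at h
      injection h with h'; subst h'
      rcases ih hk with ⟨h1, h2⟩
      exact ⟨Nat.le_succ_of_le h1, h2⟩

theorem pvHasPred_congr {g : PySem.Dict String (List String)} {S S' : String → Option Nat}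
    (h : ∀ u, (S u).isSome = (S' u).isSome) (ks : List String) (v : String) :
    pvHasPred g S ks v = pvHasPred g S' ks v := by
  unfold pvHasPred
  exact PySem.List.any_congr_mem (fun u _ => by rw [h u])

theorem refD_stable {g : PySem.Dict String (List String)} {s : String} {k : Nat}
    (h : ∀ w, refD g s (k + 1) w = refD g s k w) :
    ∀ m, k ≤ m → ∀ w, refD g s m w = refD g s k w := by
  intro m hkm
  induction m, hkm using Nat.le_induction with
  | base => intro w; rfl
  | succ m hm ih =>
    intro w
    rcases hw : refD g s m w with _ | j
    · have hw' : refD g s k w = none := by rw [← ih w]; exact hw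
      have hsucc : pvHasPred g (refD g s k) g.keys w = false := by
        have hk1 := h w
        rw [refD_succ_of_none hw', hw'] at hk1
        by_contra hc
        rw [if_pos (by simpa using hc)] at hk1
        cases hk1
      rw [refD_succ_of_none hw,
        pvHasPred_congr (fun u => by rw [ih u]) g.keys w, hsucc, hw']
      simp
    · rw [refD_succ_of_some hw, ← ih w, hw]

-- a discovered predecessor of an undiscovered node carries the maximal distance
theorem refD_pred_eq {g : PySem.Dict String (List String)} {s : String} {k : Nat}
    {u v : String} {j : Nat} (hu : g.contains u = true) (hv : v ∈ g.getD u [])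
    (hj : refD g s k u = some j) (hnv : refD g s k v = none) : j = k := by
  rcases refD_some hj with ⟨hjk, hjj⟩
  have hnext : (refD g s (j + 1) v).isSome := by
    rcases hjv : refD g s j v with _ | j'
    · rw [refD_succ_of_none hjv, if_pos ?_]
      · rfl
      · unfold pvHasPred
        rw [List.any_eq_true]
        exact ⟨u, (PySem.Dict.contains_iff_mem_keys g u).mp hu, by simp [hjj, hv]⟩
    · rw [refD_succ_of_some hjv]; rfl
  by_contra hne
  have hj1k : j + 1 ≤ k := by omega
  rcases ho : refD g s (j+1) v with _ | j'
  · rw [ho] at hnext; cases hnext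
  · rw [refD_mono_le hj1k ho] at hnv; cases hnv

-- B side: the sweep adds exactly the next breadth layer, with value k+1
theorem pvContains_eq_isSome_refD {g : PySem.Dict String (List String)} {s : String} {k : Nat}
    {dist : PySem.Dict String Int}
    (hInv : ∀ v, dist.get? v = (refD g s k v).map (fun j => (j : Int))) (x : String) :
    dist.contains x = (refD g s k x).isSome := by
  rw [PySem.Dict.contains_eq_isSome_get?, hInv x]
  cases refD g s k x <;> rfl

theorem pvSweepInner_char (g : PySem.Dict String (List String)) (s : String) (k : Nat)
    (dist : PySem.Dict String Int)
    (hInv : ∀ v, dist.get? v = (refD g s k v).map (fun j => (j : Int)))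
    (u : String) (hu : g.contains u = true) (ju : Nat) (hju : refD g s k u = some ju) :
    ∀ (l : List String), (∀ x ∈ l, x ∈ g.getD u []) →
    ∀ (P : String → Prop) (_ : DecidablePred P) (upd : PySem.Dict String Int),
    (∀ w, upd.get? w = if refD g s k w = none ∧ P w then some ((k : Int) + 1) else none) →
    ∀ v, ((l.foldl (fun upd v =>
        if !dist.contains v && !upd.contains v then upd.insert v (dist.getD u 0 + 1) else upd)
        upd).get? v)
      = if refD g s k v = none ∧ (P v ∨ v ∈ l) then some ((k : Int) + 1) else none := by
  intro l
  induction l with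
  | nil =>
    intro _ P _ upd hupd v
    rw [List.foldl_nil, hupd v]
    exact if_congr (by simp) rfl rfl
  | cons x l ih =>
    intro hl P hP upd hupd v
    have hsub : ∀ y ∈ l, y ∈ g.getD u [] := fun y hy => hl y (List.mem_cons_of_mem _ hy)
    rw [List.foldl_cons]
    rcases hrx : refD g s k x with _ | jx
    · -- x undiscovered: dist.contains x = false
      have hdx : dist.contains x = false := by
        rw [pvContains_eq_isSome_refD hInv x, hrx]; rfl
      by_cases hPx : P x
      · -- already in updates: skip
        have hux : upd.contains x = true := by
          rw [PySem.Dict.contains_eq_isSome_get?, hupd x, if_pos ⟨hrx, hPx⟩]; rfl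
        rw [if_neg (by rw [hdx, hux]; simp)]
        rw [ih hsub P hP upd hupd v]
        refine if_congr (and_congr_right fun _ => ?_) rfl rfl
        simp only [List.mem_cons]
        constructor
        · rintro (h | h)
          · exact Or.inl h
          · exact Or.inr (Or.inr h)
        · rintro (h | rfl | h)
          · exact Or.inl h
          · exact Or.inl hPx
          · exact Or.inr h
      · -- fresh: insert with value dist[u] + 1 = k + 1
        have hux : upd.contains x = false := by
          rw [PySem.Dict.contains_eq_isSome_get?, hupd x, if_neg (fun h => hPx h.2)]; rfl
        have hjk : ju = k := refD_pred_eq hu (hl x (List.mem_cons_self ..)) hju hrx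
        have hval : dist.getD u 0 = (k : Int) := by
          rw [PySem.Dict.getD_eq_get?_getD, hInv u, hju, hjk]; rfl
        rw [hdx, hux]
        simp only [Bool.not_false, Bool.and_self, if_true]
        have hupd' : ∀ w, (upd.insert x (dist.getD u 0 + 1)).get? w
            = if refD g s k w = none ∧ (P w ∨ w = x) then some ((k : Int) + 1) else none := by
          intro w
          rw [PySem.Dict.get?_insert]
          by_cases hw : w = x
          · subst hw
            rw [if_pos rfl, if_pos ⟨hrx, Or.inr rfl⟩, hval]
          · rw [if_neg hw, hupd w]
            refine if_congr (and_congr_right fun _ => ?_) rfl rfl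
            constructor
            · exact Or.inl
            · rintro (h | rfl)
              · exact h
              · exact absurd rfl hw
        rw [ih hsub (fun w => P w ∨ w = x) inferInstance _ hupd' v]
        refine if_congr (and_congr_right fun _ => ?_) rfl rfl
        simp only [List.mem_cons]
        tauto
    · -- x already discovered: dist.contains x = true
      have hdx : dist.contains x = true := by
        rw [pvContains_eq_isSome_refD hInv x, hrx]; rfl
      rw [if_neg (by rw [hdx]; simp)]
      rw [ih hsub P hP upd hupd v]
      refine if_congr (and_congr_right fun hnone => ?_) rfl rfl
      simp only [List.mem_cons]
      constructor
      · rintro (h | h)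
        · exact Or.inl h
        · exact Or.inr (Or.inr h)
      · rintro (h | rfl | h)
        · exact Or.inl h
        · rw [hrx] at hnone; cases hnone
        · exact Or.inr h

theorem pvSweepOuter_char (g : PySem.Dict String (List String)) (s : String) (k : Nat)
    (dist : PySem.Dict String Int)
    (hInv : ∀ v, dist.get? v = (refD g s k v).map (fun j => (j : Int))) :
    ∀ (ks : List String), (∀ x ∈ ks, x ∈ g.keys) →
    ∀ (P : String → Prop) (_ : DecidablePred P) (upd : PySem.Dict String Int),
    (∀ w, upd.get? w = if refD g s k w = none ∧ P w then some ((k : Int) + 1) else none) →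
    ∀ v, ((ks.foldl (fun upd u =>
        if dist.contains u then
          (g.getD u []).foldl (fun upd v =>
            if !dist.contains v && !upd.contains v then upd.insert v (dist.getD u 0 + 1) else upd) upd
        else upd) upd).get? v)
      = if refD g s k v = none ∧ (P v ∨ ∃ u ∈ ks, (refD g s k u).isSome ∧ v ∈ g.getD u [])
        then some ((k : Int) + 1) else none := by
  intro ks
  induction ks with
  | nil =>
    intro _ P _ upd hupd v
    rw [List.foldl_nil, hupd v]
    exact if_congr (by simp) rfl rfl
  | cons u ks ih =>
    intro hks P hP upd hupd v
    have hsub : ∀ x ∈ ks, x ∈ g.keys := fun x hx => hks x (List.mem_cons_of_mem _ hx)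
    rw [List.foldl_cons]
    rcases hru : refD g s k u with _ | ju
    · -- u undiscovered: skipped
      have hdu : dist.contains u = false := by
        rw [pvContains_eq_isSome_refD hInv u, hru]; rfl
      rw [if_neg (by rw [hdu]; simp)]
      rw [ih hsub P hP upd hupd v]
      refine if_congr (and_congr_right fun _ => ?_) rfl rfl
      constructor
      · rintro (h | ⟨w, hw, hws, hwv⟩)
        · exact Or.inl h
        · exact Or.inr ⟨w, List.mem_cons_of_mem _ hw, hws, hwv⟩
      · rintro (h | ⟨w, hw, hws, hwv⟩)
        · exact Or.inl h
        · rcases List.mem_cons.mp hw with rfl | hw'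
          · rw [hru] at hws; cases hws
          · exact Or.inr ⟨w, hw', hws, hwv⟩
    · -- u discovered: sweep its adjacency list
      have hdu : dist.contains u = true := by
        rw [pvContains_eq_isSome_refD hInv u, hru]; rfl
      have hcu : g.contains u = true :=
        (PySem.Dict.contains_iff_mem_keys g u).mpr (hks u (List.mem_cons_self ..))
      rw [hdu]
      simp only [if_true]
      have hupd' := pvSweepInner_char g s k dist hInv u hcu ju hru (g.getD u [])
        (fun x hx => hx) P hP upd hupd
      rw [ih hsub (fun w => P w ∨ w ∈ g.getD u []) inferInstance _ hupd' v]
      refine if_congr (and_congr_right fun _ => ?_) rfl rfl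
      constructor
      · rintro ((h | h) | ⟨w, hw, hws, hwv⟩)
        · exact Or.inl h
        · exact Or.inr ⟨u, List.mem_cons_self .., by rw [hru]; exact ⟨rfl, h⟩⟩
        · exact Or.inr ⟨w, List.mem_cons_of_mem _ hw, hws, hwv⟩
      · rintro (h | ⟨w, hw, hws, hwv⟩)
        · exact Or.inl (Or.inl h)
        · rcases List.mem_cons.mp hw with rfl | hw'
          · exact Or.inl (Or.inr hwv)
          · exact Or.inr ⟨w, hw', hws, hwv⟩

theorem pvSweep_char (g : PySem.Dict String (List String)) (s : String) (k : Nat)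
    (dist : PySem.Dict String Int)
    (hInv : ∀ v, dist.get? v = (refD g s k v).map (fun j => (j : Int))) (v : String) :
    (pvSweep g dist).get? v
      = if refD g s k v = none ∧ pvHasPred g (refD g s k) g.keys v = true
        then some ((k : Int) + 1) else none := by
  unfold pvSweep
  rw [pvSweepOuter_char g s k dist hInv g.keys (fun x hx => hx) (fun _ => False) inferInstance
    PySem.Dict.empty (fun w => by rw [PySem.Dict.get?_empty]; simp) v]
  refine if_congr (and_congr_right fun _ => ?_) rfl rfl
  unfold pvHasPred
  rw [List.any_eq_true]
  simp only [Bool.and_eq_true, decide_eq_true_eq, false_or]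

theorem pvSweep_nodup (g : PySem.Dict String (List String)) (dist : PySem.Dict String Int) :
    (pvSweep g dist).keys.Nodup := by
  have inner : ∀ (l : List String) (u : String) (upd : PySem.Dict String Int),
      upd.keys.Nodup →
      (l.foldl (fun upd v =>
        if !dist.contains v && !upd.contains v then upd.insert v (dist.getD u 0 + 1) else upd)
        upd).keys.Nodup := by
    intro l
    induction l with
    | nil => intro _ upd h; exact h
    | cons v l ih =>
      intro u upd h
      rw [List.foldl_cons]
      by_cases hc : !dist.contains v && !upd.contains v
      · rw [if_pos hc]; exact ih u _ (PySem.Dict.nodup_keys_insert _ _ _ h)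
      · rw [if_neg hc]; exact ih u upd h
  have outer : ∀ (ks : List String) (upd : PySem.Dict String Int),
      upd.keys.Nodup →
      (ks.foldl (fun upd u =>
        if dist.contains u then
          (g.getD u []).foldl (fun upd v =>
            if !dist.contains v && !upd.contains v then upd.insert v (dist.getD u 0 + 1) else upd) upd
        else upd) upd).keys.Nodup := by
    intro ks
    induction ks with
    | nil => intro upd h; exact h
    | cons u ks ih =>
      intro upd h
      rw [List.foldl_cons]
      by_cases hc : dist.contains u = true
      · rw [if_pos hc]; exact ih _ (inner _ u upd h)
      · rw [if_neg hc]; exact ih upd h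
  exact outer g.keys PySem.Dict.empty PySem.Dict.nodup_keys_empty

-- folding insert over an association list with distinct keys = first-match lookup, then fallback
theorem pvGet?_update (l : List (String × Int)) :
    ∀ (_ : (l.map Prod.fst).Nodup) (d : PySem.Dict String Int) (v : String),
    ((l.foldl (fun d p => d.insert p.1 p.2) d).get? v)
      = match l.find? (fun p => p.1 == v) with
        | some p => some p.2
        | none => d.get? v := by
  induction l with
  | nil => intro _ d v; rfl
  | cons x t ih =>
    intro hnd d v
    rw [List.foldl_cons, List.find?_cons]
    rcases hbe : (x.1 == v) with _ | _
    · simp only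
      rw [ih (by simpa using (List.nodup_cons.mp (by simpa using hnd)).2) _ v]
      have hne : v ≠ x.1 := fun h => by simp [h] at hbe
      rcases ht : t.find? (fun p => p.1 == v) with _ | p
      · rw [ht]
        exact PySem.Dict.get?_insert_of_ne _ _ hne
      · rw [ht]
    · simp only
      have hvx : x.1 = v := beq_iff_eq.mp hbe
      have hmem : x.1 ∉ t.map Prod.fst := (List.nodup_cons.mp (by simpa using hnd)).1
      have hnone : t.find? (fun p => p.1 == v) = none := by
        refine List.find?_eq_none.mpr (fun p hp hc => hmem ?_)
        have : p.1 = v := beq_iff_eq.mp hc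
        rw [hvx, ← this]
        exact List.mem_map_of_mem hp
      rw [ih (by simpa using (List.nodup_cons.mp (by simpa using hnd)).2) _ v, hnone]
      simp only
      rw [← hvx]
      exact PySem.Dict.get?_insert_self _ _ _

theorem pvRelax_char (g : PySem.Dict String (List String)) (s : String) :
    ∀ (n : Nat) (dist : PySem.Dict String Int) (k : Nat), pvCntU g dist ≤ n →
    (∀ v, dist.get? v = (refD g s k v).map (fun j => (j : Int))) →
    ∃ K, (∀ v, (pvRelax g dist).get? v = (refD g s K v).map (fun j => (j : Int))) ∧
      (∀ w, refD g s (K + 1) w = refD g s K w) := by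
  have hstep : ∀ (dist : PySem.Dict String Int) (k : Nat),
      (∀ v, dist.get? v = (refD g s k v).map (fun j => (j : Int))) →
      ¬ (pvSweep g dist).items = [] →
      (∀ v, (dist.update (pvSweep g dist).items).get? v
        = (refD g s (k + 1) v).map (fun j => (j : Int))) := by
    intro dist k hInv _ v
    have hupd : (dist.update (pvSweep g dist).items).get? v
        = match (pvSweep g dist).items.find? (fun p => p.1 == v) with
          | some p => some p.2
          | none => dist.get? v :=
      pvGet?_update (pvSweep g dist).items (pvSweep_nodup g dist) dist v
    have hfind : (pvSweep g dist).items.find? (fun p => p.1 == v)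
        = ((pvSweep g dist).get? v).map (fun c => (v, c)) := by
      rw [show (pvSweep g dist).get? v
          = ((pvSweep g dist).items.find? (fun p => p.1 == v)).map Prod.snd from rfl]
      rcases hf : (pvSweep g dist).items.find? (fun p => p.1 == v) with _ | p
      · rw [hf]; rfl
      · rw [hf]
        have hp1 : p.1 = v := beq_iff_eq.mp (List.find?_some (p := fun q : String × Int => q.1 == v) hf)
        simp only [Option.map_some]
        rw [← hp1]
    rw [hupd, hfind, pvSweep_char g s k dist hInv v]
    by_cases hc : refD g s k v = none ∧ pvHasPred g (refD g s k) g.keys v = true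
    · rw [if_pos hc]
      rw [refD_succ_of_none hc.1, if_pos hc.2]
      simp only [Option.map_some]
      rfl
    · rw [if_neg hc]
      simp only [Option.map_none]
      rw [hInv v]
      rcases hr : refD g s k v with _ | j
      · have hnp : pvHasPred g (refD g s k) g.keys v = false := by
          by_contra h
          exact hc ⟨hr, by simpa using h⟩
        rw [refD_succ_of_none hr, if_neg (by rw [hnp]; simp)]
      · rw [refD_succ_of_some hr]
  intro n
  induction n with
  | zero =>
    intro dist k hcnt hInv
    by_cases hit : (pvSweep g dist).items = []
    · refine ⟨k, ?_, ?_⟩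
      · intro v; rw [pvRelax, dif_pos hit]; exact hInv v
      · intro w
        rcases hr : refD g s k w with _ | j
        · have hget : (pvSweep g dist).get? w = none := by
            rw [show (pvSweep g dist).get? w
              = ((pvSweep g dist).items.find? (fun p => p.1 == w)).map Prod.snd from rfl, hit]
            rfl
          rw [pvSweep_char g s k dist hInv w] at hget
          have hnp : pvHasPred g (refD g s k) g.keys w = false := by
            by_contra h
            rw [if_pos ⟨hr, by simpa using h⟩] at hget
            cases hget
          rw [refD_succ_of_none hr, if_neg (by rw [hnp]; simp)]
        · rw [refD_succ_of_some hr]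
    · exact absurd (Nat.lt_of_lt_of_le (pvRelax_measure g dist hit) hcnt) (Nat.not_lt_zero _)
  | succ n ih =>
    intro dist k hcnt hInv
    by_cases hit : (pvSweep g dist).items = []
    · refine ⟨k, ?_, ?_⟩
      · intro v; rw [pvRelax, dif_pos hit]; exact hInv v
      · intro w
        rcases hr : refD g s k w with _ | j
        · have hget : (pvSweep g dist).get? w = none := by
            rw [show (pvSweep g dist).get? w
              = ((pvSweep g dist).items.find? (fun p => p.1 == w)).map Prod.snd from rfl, hit]
            rfl
          rw [pvSweep_char g s k dist hInv w] at hget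
          have hnp : pvHasPred g (refD g s k) g.keys w = false := by
            by_contra h
            rw [if_pos ⟨hr, by simpa using h⟩] at hget
            cases hget
          rw [refD_succ_of_none hr, if_neg (by rw [hnp]; simp)]
        · rw [refD_succ_of_some hr]
    · have hlt := pvRelax_measure g dist hit
      rcases ih (dist.update (pvSweep g dist).items) (k + 1) (by omega)
        (hstep dist k hInv hit) with ⟨K, h1, h2⟩
      refine ⟨K, ?_, h2⟩
      intro v
      rw [pvRelax, dif_neg hit]
      exact h1 v

theorem pvRelax_start (g : PySem.Dict String (List String)) (s : String) :
    ∃ K, (∀ v, (pvRelax g (PySem.Dict.empty.insert s 0)).get? v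
        = (refD g s K v).map (fun j => (j : Int))) ∧
      (∀ w, refD g s (K + 1) w = refD g s K w) := by
  refine pvRelax_char g s (pvCntU g (PySem.Dict.empty.insert s 0)) _ 0 (le_refl _) ?_
  intro v
  rw [PySem.Dict.get?_insert, refD_zero]
  by_cases hv : v = s
  · rw [if_pos hv, if_pos hv]; rfl
  · rw [if_neg hv, if_neg hv, PySem.Dict.get?_empty]; rfl

-- A side, part 1 (loop shape): the deque BFS processes the queue level by level
def pvStepLevel (g : PySem.Dict String (List String)) :
    List String → Int → PySem.Dict String Int → List String → PySem.Dict String Int × List String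
  | [], _, dist, acc => (dist, acc)
  | node :: rest, d, dist, acc =>
    if dist.contains node then pvStepLevel g rest d dist acc
    else
      match g.get? node with
      | some neigh => pvStepLevel g rest d (dist.insert node d) (acc ++ neigh)
      | none => (dist.insert node d, [])

theorem pvStepLevel_cnt_le (g : PySem.Dict String (List String)) :
    ∀ (f : List String) (d : Int) (dist : PySem.Dict String Int) (acc : List String),
      pvCnt g (pvStepLevel g f d dist acc).1 ≤ pvCnt g dist := by
  intro f
  induction f with
  | nil => intro d dist acc; exact le_refl _
  | cons node rest ih =>
    intro d dist acc
    by_cases hc : dist.contains node = true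
    · simpa [pvStepLevel, hc] using ih d dist acc
    · have hc' : dist.contains node = false := by simpa using hc
      rcases hg : g.get? node with _ | neigh
      · simpa [pvStepLevel, hc', hg] using pvCnt_insert_le g dist node d
      · simpa [pvStepLevel, hc', hg] using
          (ih d (dist.insert node d) (acc ++ neigh)).trans (pvCnt_insert_le g dist node d)

theorem pvStepLevel_cnt (g : PySem.Dict String (List String)) :
    ∀ (f : List String) (d : Int) (dist : PySem.Dict String Int),
      pvCnt g (pvStepLevel g f d dist []).1 < pvCnt g dist ∨
      (pvStepLevel g f d dist []).2 = [] := by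
  have key : ∀ (f : List String) (d : Int) (dist : PySem.Dict String Int) (acc : List String),
      pvCnt g (pvStepLevel g f d dist acc).1 < pvCnt g dist ∨
      (pvStepLevel g f d dist acc).2 = acc ∨ (pvStepLevel g f d dist acc).2 = [] := by
    intro f
    induction f with
    | nil => intro d dist acc; right; left; rfl
    | cons node rest ih =>
      intro d dist acc
      by_cases hc : dist.contains node = true
      · simpa [pvStepLevel, hc] using ih d dist acc
      · have hc' : dist.contains node = false := by simpa using hc
        rcases hg : g.get? node with _ | neigh
        · right; right; simp [pvStepLevel, hc', hg]
        · have hlt := pvCnt_insert_lt g dist node d (pvMem_keys_of_get?_some hg) hc'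
          left
          simpa [pvStepLevel, hc', hg] using
            (pvStepLevel_cnt_le g rest d (dist.insert node d) (acc ++ neigh)).trans_lt hlt
  intro f d dist
  rcases key f d dist [] with h | h | h
  · left; exact h
  · right; exact h
  · right; exact h

def pvLevels (g : PySem.Dict String (List String)) (frontier : List String) (d : Int)
    (dist : PySem.Dict String Int) : PySem.Dict String Int :=
  match frontier with
  | [] => dist
  | node :: rest =>
    let p := pvStepLevel g (node :: rest) d dist []
    pvLevels g p.2 (d + 1) p.1
termination_by (pvCnt g dist, frontier.length)
decreasing_by
  rcases pvStepLevel_cnt g (node :: rest) d dist with h | h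
  · exact Prod.Lex.left _ _ h
  · rcases Nat.lt_or_ge (pvCnt g (pvStepLevel g (node :: rest) d dist []).1) (pvCnt g dist) with h2 | h2
    · exact Prod.Lex.left _ _ h2
    · have : pvCnt g (pvStepLevel g (node :: rest) d dist []).1 = pvCnt g dist :=
        Nat.le_antisymm (pvStepLevel_cnt_le g (node :: rest) d dist []) h2
      rw [this, h]
      exact Prod.Lex.right _ (Nat.succ_pos _)

-- processing a queue of one whole level (distance d) followed by next-level entries is one pvStepLevel
theorem pvBfsLoop_level (g : PySem.Dict String (List String)) :
    ∀ (front : List String) (d : Int) (nxt : List String) (dist : PySem.Dict String Int),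
      pvBfsLoop g (front.map (fun n => (d, n)) ++ nxt.map (fun n => (d + 1, n))) dist
        = pvBfsLoop g ((pvStepLevel g front d dist nxt).2.map (fun n => (d + 1, n)))
            (pvStepLevel g front d dist nxt).1 := by
  intro front
  induction front with
  | nil => intro d nxt dist; rfl
  | cons node rest ih =>
    intro d nxt dist
    rw [List.map_cons, List.cons_append, pvBfsLoop]
    by_cases hc : dist.contains node = true
    · rw [if_pos hc, ih d nxt dist]
      simp [pvStepLevel, hc]
    · have hc' : dist.contains node = false := by simpa using hc
      rw [if_neg hc]
      split
      · next neigh heq =>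
          have harr : (rest.map (fun n => (d, n)) ++ nxt.map (fun n => (d + 1, n)))
                ++ neigh.map (fun n => (d + 1, n))
              = rest.map (fun n => (d, n)) ++ (nxt ++ neigh).map (fun n => (d + 1, n)) := by
            rw [List.map_append, List.append_assoc]
          rw [harr, ih d (nxt ++ neigh) (dist.insert node d)]
          simp [pvStepLevel, hc', heq]
      · next heq =>
          simp [pvStepLevel, hc', heq, pvBfsLoop]

-- the deque BFS on a single-level queue is the frontier/level BFS
theorem pvBfsLoop_eq_pvLevels (g : PySem.Dict String (List String)) :
    ∀ (n : Nat) (dist : PySem.Dict String Int) (front : List String) (d : Int),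
      pvCnt g dist ≤ n →
      pvBfsLoop g (front.map (fun n => (d, n))) dist = pvLevels g front d dist := by
  intro n
  induction n with
  | zero =>
    intro dist front d hle
    cases front with
    | nil => simp [pvBfsLoop, pvLevels]
    | cons node rest =>
      have h1 : (node :: rest).map (fun n => (d, n))
          = (node :: rest).map (fun n => (d, n)) ++ ([] : List String).map (fun n => (d + 1, n)) := by
        simp
      rw [pvLevels, h1, pvBfsLoop_level g (node :: rest) d [] dist]
      rcases pvStepLevel_cnt g (node :: rest) d dist with h | h
      · omega
      · rw [h]; simp [pvBfsLoop, pvLevels]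
  | succ n ih =>
    intro dist front d hle
    cases front with
    | nil => simp [pvBfsLoop, pvLevels]
    | cons node rest =>
      have h1 : (node :: rest).map (fun n => (d, n))
          = (node :: rest).map (fun n => (d, n)) ++ ([] : List String).map (fun n => (d + 1, n)) := by
        simp
      rw [pvLevels, h1, pvBfsLoop_level g (node :: rest) d [] dist]
      rcases pvStepLevel_cnt g (node :: rest) d dist with h | h
      · exact ih _ _ _ (by omega)
      · rw [h]; simp [pvBfsLoop, pvLevels]

-- A side, part 2: distances recorded before level k
def pvPrevD (g : PySem.Dict String (List String)) (s : String) : Nat → String → Option Nat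
  | 0, _ => none
  | (k + 1), v => refD g s k v

theorem pvPrevD_succ (g : PySem.Dict String (List String)) (s : String) (k : Nat) (v : String) :
    pvPrevD g s (k + 1) v = refD g s k v := rfl

theorem pvPrevD_of_lt {g : PySem.Dict String (List String)} {s : String} {k j : Nat} {v : String}
    (h : refD g s k v = some j) (hj : j < k) : pvPrevD g s k v = some j := by
  rcases k with _ | k'
  · omega
  · exact refD_mono_le (by omega) (refD_some h).2

theorem pvPrevD_of_none {g : PySem.Dict String (List String)} {s : String} {k : Nat} {v : String}
    (h : refD g s k v = none) : pvPrevD g s k v = none := by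
  rcases k with _ | k'
  · rfl
  · exact refD_none_anti (Nat.le_succ _) h

theorem pvPrevD_of_eq {g : PySem.Dict String (List String)} {s : String} {k : Nat} {v : String}
    (h : refD g s k v = some k) : pvPrevD g s k v = none := by
  rcases k with _ | k'
  · rfl
  · rcases hp : refD g s k' v with _ | j
    · simp [pvPrevD, hp]
    · rw [refD_succ_of_some hp] at h
      injection h with h'
      have := (refD_some hp).1
      omega

theorem pvStepLevel_char (g : PySem.Dict String (List String)) (s : String) (k : Nat) :
    ∀ (l : List String), (∀ x ∈ l, (refD g s k x).isSome ∧ g.contains x = true) →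
    ∀ (P : String → Prop) (_ : DecidablePred P) (dist : PySem.Dict String Int) (acc : List String),
    (∀ v, dist.get? v = if refD g s k v = some k ∧ P v then some ((k : Nat) : Int)
        else (pvPrevD g s k v).map (fun j => (j : Int))) →
    (∀ v, (pvStepLevel g l ((k : Nat) : Int) dist acc).1.get? v
        = if refD g s k v = some k ∧ (P v ∨ v ∈ l) then some ((k : Nat) : Int)
          else (pvPrevD g s k v).map (fun j => (j : Int)))
    ∧ (∀ v ∈ (pvStepLevel g l ((k : Nat) : Int) dist acc).2,
        v ∈ acc ∨ ∃ u, refD g s k u = some k ∧ g.contains u = true ∧ v ∈ g.getD u [])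
    ∧ (∀ x ∈ acc, x ∈ (pvStepLevel g l ((k : Nat) : Int) dist acc).2)
    ∧ (∀ u ∈ l, (refD g s k u = some k ∧ ¬ P u) →
        ∀ w ∈ g.getD u [], w ∈ (pvStepLevel g l ((k : Nat) : Int) dist acc).2) := by
  intro l
  induction l with
  | nil =>
    intro _ P hP dist acc Ha
    refine ⟨?_, ?_, ?_, ?_⟩
    · intro v
      rw [show pvStepLevel g [] ((k : Nat) : Int) dist acc = (dist, acc) from rfl, Ha v]
      exact if_congr (and_congr_right fun _ => by simp) rfl rfl
    · intro v hv; exact Or.inl hv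
    · intro x hx; exact hx
    · intro u hu; cases hu
  | cons node rest ih =>
    intro hl P hP dist acc Ha
    have hnode := hl node (List.mem_cons_self ..)
    have hsub : ∀ x ∈ rest, (refD g s k x).isSome ∧ g.contains x = true :=
      fun x hx => hl x (List.mem_cons_of_mem _ hx)
    rcases hrn : refD g s k node with _ | jn
    · rw [hrn] at hnode; cases hnode.1
    · rcases hgn : g.get? node with _ | neigh
      · rw [PySem.Dict.contains_eq_isSome_get?, hgn] at hnode; cases hnode.2
      · have hjk := (refD_some hrn).1
        by_cases hfresh : jn = k ∧ ¬ P node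
        · -- node is promoted at this level
          have hcn : dist.contains node = false := by
            rw [PySem.Dict.contains_eq_isSome_get?, Ha node,
              if_neg (fun h => hfresh.2 h.2)]
            rw [pvPrevD_of_eq (by rw [hrn, hfresh.1])]
            rfl
          have hstep : pvStepLevel g (node :: rest) ((k : Nat) : Int) dist acc
              = pvStepLevel g rest ((k : Nat) : Int)
                  (dist.insert node ((k : Nat) : Int)) (acc ++ neigh) := by
            rw [pvStepLevel, if_neg (by rw [hcn]; simp), hgn]
          have Ha' : ∀ v, (dist.insert node ((k : Nat) : Int)).get? v
              = if refD g s k v = some k ∧ (P v ∨ v = node) then some ((k : Nat) : Int)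
                else (pvPrevD g s k v).map (fun j => (j : Int)) := by
            intro v
            rw [PySem.Dict.get?_insert]
            by_cases hv : v = node
            · subst hv
              rw [if_pos rfl, if_pos ⟨by rw [hrn, hfresh.1], Or.inr rfl⟩]
            · rw [if_neg hv, Ha v]
              refine if_congr (and_congr_right fun _ => ?_) rfl rfl
              constructor
              · exact Or.inl
              · rintro (h | rfl)
                · exact h
                · exact absurd rfl hv
          rcases ih hsub (fun v => P v ∨ v = node) inferInstance _ (acc ++ neigh) Ha'
            with ⟨C1, C2, C3, C4⟩
          rw [hstep]
          refine ⟨?_, ?_, ?_, ?_⟩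
          · intro v
            rw [C1 v]
            refine if_congr (and_congr_right fun _ => ?_) rfl rfl
            simp only [List.mem_cons]
            tauto
          · intro v hv
            rcases C2 v hv with hva | hex
            · rcases List.mem_append.mp hva with h | h
              · exact Or.inl h
              · refine Or.inr ⟨node, by rw [hrn, hfresh.1], hnode.2, ?_⟩
                rw [PySem.Dict.getD_eq_get?_getD, hgn]
                exact h
            · exact Or.inr hex
          · intro x hx
            exact C3 x (List.mem_append_left _ hx)
          · intro u hu hu2 w hw
            rcases List.mem_cons.mp hu with rfl | hu'
            · refine C3 w (List.mem_append_right _ ?_)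
              rw [PySem.Dict.getD_eq_get?_getD, hgn] at hw
              exact hw
            · by_cases hun : u = node
              · subst hun
                refine C3 w (List.mem_append_right _ ?_)
                rw [PySem.Dict.getD_eq_get?_getD, hgn] at hw
                exact hw
              · exact C4 u hu' ⟨hu2.1, fun h => by
                  rcases h with h | h
                  · exact hu2.2 h
                  · exact hun h⟩ w hw
        · -- node already recorded: skipped
          have hcn : dist.contains node = true := by
            rw [PySem.Dict.contains_eq_isSome_get?, Ha node]
            by_cases hPn : refD g s k node = some k ∧ P node
            · rw [if_pos hPn]; rfl
            · rw [if_neg hPn]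
              have hlt : jn < k := by
                rcases Nat.lt_or_ge jn k with h | h
                · exact h
                · exfalso
                  have : jn = k := by omega
                  subst this
                  rcases Decidable.em (P node) with h' | h'
                  · exact hPn ⟨hrn, h'⟩
                  · exact hfresh ⟨rfl, h'⟩
              rw [pvPrevD_of_lt hrn hlt]
              rfl
          have hstep : pvStepLevel g (node :: rest) ((k : Nat) : Int) dist acc
              = pvStepLevel g rest ((k : Nat) : Int) dist acc := by
            rw [pvStepLevel, if_pos hcn]
          rcases ih hsub P hP dist acc Ha with ⟨C1, C2, C3, C4⟩
          rw [hstep]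
          refine ⟨?_, ?_, ?_, ?_⟩
          · intro v
            rw [C1 v]
            refine if_congr (and_congr_right fun hsome => ?_) rfl rfl
            simp only [List.mem_cons]
            constructor
            · rintro (h | h)
              · exact Or.inl h
              · exact Or.inr (Or.inr h)
            · rintro (h | rfl | h)
              · exact Or.inl h
              · rw [hsome] at hrn
                injection hrn with h'
                rcases Decidable.em (P v) with hp | hp
                · exact Or.inl hp
                · exact absurd ⟨h'.symm, hp⟩ hfresh
              · exact Or.inr h
          · exact C2
          · exact C3
          · intro u hu hu2 w hw
            rcases List.mem_cons.mp hu with rfl | hu'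
            · exfalso
              rw [hrn] at hu2
              injection hu2.1 with h'
              exact hfresh ⟨h', hu2.2⟩
            · exact C4 u hu' hu2 w hw

theorem pvLevels_nil_char (g : PySem.Dict String (List String)) (s : String) (k : Nat)
    (dist : PySem.Dict String Int)
    (Ha : ∀ v, dist.get? v = (pvPrevD g s k v).map (fun j => (j : Int)))
    (Hb2 : ∀ v, refD g s k v = some k → v ∈ ([] : List String)) :
    ∃ K, (∀ v, (pvLevels g [] ((k : Nat) : Int) dist).get? v
        = (refD g s K v).map (fun j => (j : Int))) ∧
      (∀ w, refD g s (K + 1) w = refD g s K w) := by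
  rcases k with _ | k'
  · exact absurd (Hb2 s (by rw [refD_zero, if_pos rfl])) (List.not_mem_nil)
  · refine ⟨k', ?_, ?_⟩
    · intro v
      rw [pvLevels, Ha v]
      rfl
    · intro w
      rcases hw : refD g s (k' + 1) w with _ | j
      · rw [refD_none_anti (Nat.le_succ _) hw]
      · have hj := (refD_some hw).1
        rcases Nat.lt_or_ge j (k' + 1) with hlt | hge
        · rw [refD_mono_le (by omega) (refD_some hw).2]
        · have : j = k' + 1 := by omega
          subst this
          exact absurd (Hb2 w hw) (List.not_mem_nil)

theorem pvLevels_char (g : PySem.Dict String (List String)) (s : String)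
    (Hc : ∀ u v, v ∈ g.getD u [] → g.contains v = true) :
    ∀ (n : Nat) (front : List String) (k : Nat) (dist : PySem.Dict String Int),
    pvCnt g dist ≤ n →
    (∀ v, dist.get? v = (pvPrevD g s k v).map (fun j => (j : Int))) →
    (∀ x ∈ front, (refD g s k x).isSome ∧ g.contains x = true) →
    (∀ v, refD g s k v = some k → v ∈ front) →
    ∃ K, (∀ v, (pvLevels g front ((k : Nat) : Int) dist).get? v
        = (refD g s K v).map (fun j => (j : Int))) ∧
      (∀ w, refD g s (K + 1) w = refD g s K w) := by
  have hstep : ∀ (front : List String) (k : Nat) (dist : PySem.Dict String Int),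
      (∀ v, dist.get? v = (pvPrevD g s k v).map (fun j => (j : Int))) →
      (∀ x ∈ front, (refD g s k x).isSome ∧ g.contains x = true) →
      (∀ v, refD g s k v = some k → v ∈ front) →
      (∀ v, (pvStepLevel g front ((k : Nat) : Int) dist []).1.get? v
          = (pvPrevD g s (k + 1) v).map (fun j => (j : Int)))
      ∧ (∀ x ∈ (pvStepLevel g front ((k : Nat) : Int) dist []).2,
          (refD g s (k + 1) x).isSome ∧ g.contains x = true)
      ∧ (∀ v, refD g s (k + 1) v = some (k + 1) →
          v ∈ (pvStepLevel g front ((k : Nat) : Int) dist []).2) := by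
    intro front k dist Ha Hb1 Hb2
    rcases pvStepLevel_char g s k front Hb1 (fun _ => False) inferInstance dist []
      (fun v => by rw [Ha v, if_neg (fun h => h.2)]) with ⟨C1, C2, C3, C4⟩
    refine ⟨?_, ?_, ?_⟩
    · intro v
      rw [C1 v]
      rw [pvPrevD_succ]
      rcases hr : refD g s k v with _ | j
      · rw [if_neg (fun h => by cases h.1), pvPrevD_of_none hr]
      · by_cases hj : j = k
        · subst hj
          rw [if_pos ⟨rfl, Or.inr (Hb2 v hr)⟩]
          rfl
        · have hlt : j < k := by
            have := (refD_some hr).1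
            omega
          rw [if_neg (fun h => hj (Option.some.inj h.1)), pvPrevD_of_lt hr hlt]
    · intro x hx
      rcases C2 x hx with h | ⟨u, hu1, hu2, hu3⟩
      · cases h
      · constructor
        · rcases hr : refD g s k x with _ | j
          · rw [refD_succ_of_none hr, if_pos ?_]
            · rfl
            · unfold pvHasPred
              rw [List.any_eq_true]
              exact ⟨u, (PySem.Dict.contains_iff_mem_keys g u).mp hu2, by simp [hu1, hu3]⟩
          · rw [refD_succ_of_some hr]; rfl
        · exact Hc u x hu3
    · intro v hv
      rcases hr : refD g s k v with _ | j
      · rw [refD_succ_of_none hr] at hv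
        have hp : pvHasPred g (refD g s k) g.keys v = true := by
          by_contra h
          rw [if_neg (by simpa using h)] at hv
          cases hv
        unfold pvHasPred at hp
        rw [List.any_eq_true] at hp
        rcases hp with ⟨u, hu, hu2⟩
        simp only [Bool.and_eq_true, decide_eq_true_eq] at hu2
        rcases hju : refD g s k u with _ | ju
        · rw [hju] at hu2; cases hu2.1
        · have hcu : g.contains u = true := (PySem.Dict.contains_iff_mem_keys g u).mpr hu
          have : ju = k := refD_pred_eq hcu hu2.2 hju hr
          subst this
          exact C4 u (Hb2 u hju) ⟨hju, fun h => h⟩ v hu2.2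
      · rw [refD_succ_of_some hr] at hv
        injection hv with h'
        have := (refD_some hr).1
        omega
  intro n
  induction n with
  | zero =>
    intro front k dist hcnt Ha Hb1 Hb2
    cases front with
    | nil => exact pvLevels_nil_char g s k dist Ha (fun v hv => absurd (Hb2 v hv) List.not_mem_nil)
    | cons node rest =>
      rcases hstep (node :: rest) k dist Ha Hb1 Hb2 with ⟨D1, D2, D3⟩
      rcases pvStepLevel_cnt g (node :: rest) ((k : Nat) : Int) dist with h | h
      · omega
      · rw [pvLevels]
        simp only [h]
        have : ((k : Nat) : Int) + 1 = (((k + 1 : Nat) : Nat) : Int) := by push_cast; ring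
        rw [this]
        exact pvLevels_nil_char g s (k + 1) _ D1
          (fun v hv => absurd (h ▸ D3 v hv) List.not_mem_nil)
  | succ n ih =>
    intro front k dist hcnt Ha Hb1 Hb2
    cases front with
    | nil => exact pvLevels_nil_char g s k dist Ha (fun v hv => absurd (Hb2 v hv) List.not_mem_nil)
    | cons node rest =>
      rcases hstep (node :: rest) k dist Ha Hb1 Hb2 with ⟨D1, D2, D3⟩
      have hcast : ((k : Nat) : Int) + 1 = (((k + 1 : Nat) : Nat) : Int) := by push_cast; ring
      rcases pvStepLevel_cnt g (node :: rest) ((k : Nat) : Int) dist with h | h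
      · rw [pvLevels]
        rw [hcast]
        exact ih _ (k + 1) _ (by omega) D1 D2 D3
      · rw [pvLevels]
        simp only [h]
        rw [hcast]
        exact pvLevels_nil_char g s (k + 1) _ D1
          (fun v hv => absurd (h ▸ D3 v hv) List.not_mem_nil)

-- the two distance computations agree pointwise
theorem pvBfs_eq_pvRelax (g : PySem.Dict String (List String)) (s : String)
    (Hc : ∀ u v, v ∈ g.getD u [] → g.contains v = true) (hs : g.contains s = true) :
    ∀ v, (pvBfsLoop g [((0 : Int), s)] PySem.Dict.empty).get? v
        = (pvRelax g (PySem.Dict.empty.insert s 0)).get? v := by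
  have h1 : ([((0 : Int), s)] : List (Int × String)) = [s].map (fun n => ((0 : Int), n)) := rfl
  have h0 : ((0 : Nat) : Int) = (0 : Int) := rfl
  rcases pvLevels_char g s Hc (pvCnt g PySem.Dict.empty) [s] 0 PySem.Dict.empty (le_refl _)
      (fun v => by rw [PySem.Dict.get?_empty]; rfl)
      (fun x hx => by
        rcases List.mem_singleton.mp hx with rfl
        exact ⟨by rw [refD_zero, if_pos rfl]; rfl, hs⟩)
      (fun v hv => by
        rw [refD_zero] at hv
        by_cases h : v = s
        · exact List.mem_singleton.mpr h
        · rw [if_neg h] at hv; cases hv)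
    with ⟨K1, hA1, hA2⟩
  rcases pvRelax_start g s with ⟨K2, hB1, hB2⟩
  have hmeet : ∀ w, refD g s K1 w = refD g s K2 w := by
    intro w
    rcases Nat.le_total K1 K2 with h | h
    · rw [refD_stable hA2 K2 h w]
    · rw [refD_stable hB2 K1 h w]
  intro v
  rw [h1, pvBfsLoop_eq_pvLevels g (pvCnt g PySem.Dict.empty) PySem.Dict.empty [s] 0 (le_refl _)]
  exact (hA1 v).trans (by rw [hmeet v, ← hB1 v])

-- the graph built from the valve list: keys and closure
theorem pvGraph_contains (valves : List (String × Int × List String)) (v : String) :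
    (pvGraph valves).contains v = true ↔ v ∈ valves.map (fun kv => kv.1) := by
  rw [PySem.Dict.contains_iff_mem_keys]
  unfold pvGraph
  rw [PySem.Dict.keys_foldl_insert_key (key := fun kv : String × Int × List String => kv.1)
    (f := fun _ kv => kv.2.2)]
  rw [show (PySem.Dict.empty : PySem.Dict String (List String)).keys = [] from rfl]
  rw [show PySem.Set.update ([] : List String) (valves.map (fun kv => kv.1))
      = PySem.Set.ofList (valves.map (fun kv => kv.1)) from rfl]
  exact PySem.Set.mem_ofList _ _

theorem pvGraph_get?_mem (l : List (String × Int × List String)) :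
    ∀ (init : PySem.Dict String (List String)) (u : String) (tv : List String),
    ((l.foldl (fun g kv => g.insert kv.1 kv.2.2) init).get? u = some tv) →
    (∃ kv ∈ l, kv.1 = u ∧ kv.2.2 = tv) ∨ init.get? u = some tv := by
  induction l with
  | nil => intro init u tv h; exact Or.inr h
  | cons x l ih =>
    intro init u tv h
    rw [List.foldl_cons] at h
    rcases ih _ u tv h with ⟨kv, hkv, h1, h2⟩ | h'
    · exact Or.inl ⟨kv, List.mem_cons_of_mem _ hkv, h1, h2⟩
    · rw [PySem.Dict.get?_insert] at h'
      by_cases hu : u = x.1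
      · rw [if_pos hu] at h'
        injection h' with h''
        exact Or.inl ⟨x, List.mem_cons_self .., hu.symm, h''⟩
      · rw [if_neg hu] at h'
        exact Or.inr h'

theorem pvGraph_closure (valves : List (String × Int × List String))
    (h2 : ∀ kv ∈ valves, ∀ t ∈ kv.2.2, t ∈ valves.map (fun kv => kv.1)) :
    ∀ u v, v ∈ (pvGraph valves).getD u [] → (pvGraph valves).contains v = true := by
  intro u v hv
  rw [PySem.Dict.getD_eq_get?_getD] at hv
  rcases hg : (pvGraph valves).get? u with _ | l
  · rw [hg] at hv; cases hv
  · rw [hg] at hv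
    rcases pvGraph_get?_mem valves PySem.Dict.empty u l hg with ⟨kv, hkv, _, h2'⟩ | h'
    · exact (pvGraph_contains valves v).mpr (h2 kv hkv v (by rw [h2']; exact hv))
    · rw [PySem.Dict.get?_empty] at h'; cases h'

-- looking up in a dict built by inserting (key x, F (key x)) over a list
theorem pvGet?_foldl_insert_fn {β : Type} (l : List (String × Int × List String))
    (F : String → β) (k : String) :
    ∀ (init : PySem.Dict String β),
      (l.foldl (fun d kv => d.insert kv.1 (F kv.1)) init).get? k
        = if k ∈ l.map (fun kv => kv.1) then some (F k) else init.get? k := by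
  induction l with
  | nil => intro init; simp
  | cons x l ih =>
    intro init
    rw [List.foldl_cons, ih]
    by_cases hm : k ∈ l.map (fun kv => kv.1)
    · simp [hm]
    · by_cases hk : k = x.1
      · subst hk
        simp [hm, PySem.Dict.get?_insert_self]
      · simp [hm, hk, PySem.Dict.get?_insert_of_ne _ _ hk]

-- ===== VERDICT (by name: the statement is the Claim_ definition above) =====
theorem clean_up_valves_spec : Claim_equal_clean_up_valves := by
  intro valves _ hpre
  unfold Spec_clean_up_valves clean_up_valves clean_up_valves_alt
  have Hc := pvGraph_closure valves hpre.2.1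
  refine congrArg PySem.Dict.items (PySem.List.foldl_congr_mem _ _ _ _ ?_)
  intro r kv hkv
  by_cases hkeep : kv.2.1 ≠ 0 ∨ kv.1 = "AA"
  · rw [if_pos hkeep, if_pos hkeep]
    have hpv : ((valves.foldl
          (fun d kv => d.insert kv.1 (pvBfsLoop (pvGraph valves) [(0, kv.1)] PySem.Dict.empty))
          PySem.Dict.empty).get? kv.1).getD PySem.Dict.empty
        = pvBfsLoop (pvGraph valves) [(0, kv.1)] PySem.Dict.empty := by
      rw [pvGet?_foldl_insert_fn valves
          (fun k => pvBfsLoop (pvGraph valves) [(0, k)] PySem.Dict.empty) kv.1]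
      have hmem : kv.1 ∈ valves.map (fun kv => kv.1) := List.mem_map_of_mem hkv
      simp only [hmem, if_true, Option.getD_some]
    have heq := pvBfs_eq_pvRelax (pvGraph valves) kv.1 Hc
      ((pvGraph_contains valves kv.1).mpr (List.mem_map_of_mem hkv))
    have hinner : ((valves.filter (fun kv => 0 < kv.2.1)).map (fun kv => kv.1)).foldl
          (fun inn t => if t ≠ kv.1 then inn.insert t
            ((((valves.foldl (fun d kv =>
                  d.insert kv.1 (pvBfsLoop (pvGraph valves) [(0, kv.1)] PySem.Dict.empty))
                PySem.Dict.empty).get? kv.1).getD PySem.Dict.empty).getD t 0) else inn)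
          PySem.Dict.empty
        = ((valves.filter (fun kv => 0 < kv.2.1)).map (fun kv => kv.1)).foldl
          (fun inn t => if t ≠ kv.1 then inn.insert t
            ((pvRelax (pvGraph valves) (PySem.Dict.empty.insert kv.1 0)).getD t 0) else inn)
          PySem.Dict.empty := by
      refine PySem.List.foldl_congr_mem _ _ _ _ ?_
      intro inn t _
      by_cases ht : t ≠ kv.1
      · rw [if_pos ht, if_pos ht, hpv, PySem.Dict.getD_eq_get?_getD,
          PySem.Dict.getD_eq_get?_getD, heq t]
      · rw [if_neg ht, if_neg ht]
    exact congrArg (fun z => r.insert kv.1 (kv.2.1, PySem.Dict.items z)) hinner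
  · rw [if_neg hkeep, if_neg hkeep]
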